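-- pv_equiv track=rewrite | github.com/Martiin17/TDA_resueltos | PD/LondresYCalifornia.py | plan_operativo
-- ===== SOURCE A (Python) =====
-- def plan_operativo(arreglo_L, arreglo_C, costo_M):
--     if len(arreglo_L) == 0:
--         return []
--
--     if len(arreglo_L) == 1:
--         if arreglo_C[0] < arreglo_L[0]:
--             return["california"]
--         else:
--             return["londres"]
--
--     #Seteo un dia 0
--     resultado = []
--     resultado.append(0)
--     opt_L = []
--     opt_L.append(0)
--     opt_C = []
--     opt_C.append(0)
--
--     for i in range(len(arreglo_C)):
--         #El indice esta ok porque en arreglo_L y arreglo_C no tienen 0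
--         opt_L.append(arreglo_L[i] + min(opt_L[i], opt_C[i] + costo_M))
--         opt_C.append(arreglo_C[i] + min(opt_C[i], opt_L[i] + costo_M))
--         resultado.append(min(opt_L[i+1], opt_C[i+1]))
--     return reconstruccion(arreglo_L, arreglo_C, costo_M, opt_L, opt_C, resultado)
--
-- def reconstruccion(arreglo_L, arreglo_C, costo_M, opt_L, opt_C, resultado):
--     solucion = []
--     k = len(resultado) - 1
--     termine_L = False
--     if opt_L[k] < opt_C[k]:
--         termine_L = True
--         solucion.append("londres")
--     else:
--         solucion.append("california")
--     k -= 1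
--     for i in range(len(resultado)-2):
--         if termine_L == True:
--             if opt_L[k] < opt_C[k] + costo_M:
--                 solucion.append("londres")
--             else:
--                 solucion.append("california")
--                 termine_L = False
--         else:
--             if opt_C[k] < opt_L[k] + costo_M:
--                 solucion.append("california")
--             else:
--                 solucion.append("londres")
--                 termine_L = True
--         k -= 1
--     solucion.reverse()
--     return solucion
-- ===== SOURCE B (Python) =====
-- def plan_operativo(arreglo_L, arreglo_C, costo_M):
--     if len(arreglo_L) == 0:
--         return []
--     if len(arreglo_L) == 1:
--         if arreglo_C[0] < arreglo_L[0]: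
--             return ["california"]
--         else:
--             return ["londres"]
--     # Single forward pass that carries, for each end-state, the best plan so
--     # far (as a shared immutable linked list, newest day first) together with
--     # its cost; the plan for the cheaper final state is unwound at the end --
--     # no backward reconstruction pass over stored DP tables.
--     cost_L, cost_C = 0, 0
--     plan_L, plan_C = None, None  # linked cells: (label, tail)
--     for i in range(len(arreglo_C)):
--         new_cost_L = arreglo_L[i] + min(cost_L, cost_C + costo_M)
--         new_cost_C = arreglo_C[i] + min(cost_C, cost_L + costo_M)
--         new_plan_L = ("londres", plan_L if cost_L < cost_C + costo_M else plan_C)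
--         new_plan_C = ("california", plan_C if cost_C < cost_L + costo_M else plan_L)
--         cost_L, cost_C = new_cost_L, new_cost_C
--         plan_L, plan_C = new_plan_L, new_plan_C
--     cell = plan_L if cost_L < cost_C else plan_C
--     out = []
--     while cell is not None:
--         out.append(cell[0])
--         cell = cell[1]
--     out.reverse()
--     return out
-- ===== Notes on version B (the rewrite author's own statement) =====
-- stated objective: alternative
-- what changed: B replaces A's two-phase scheme (forward DP over three growing cost lists, then a backward cost-comparison backtrack with a flag and a final reverse) by a single forward pass that carries, for each end-state, the best plan built so far as a shared immutable linked list alongside its cost, and simply unwinds the cheaper final plan -- no reconstruction pass over stored DP tables.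
-- intended difference: On inputs with len(arreglo_L) >= 2 and arreglo_C empty (zero operation days), A returns the phantom plan ["california"] left over from its seeded day 0, while B returns the empty plan [], which is the intended answer when there are no days to plan. — e.g. on plan_operativo([1, 2], [], 0): A returns ["california"], B returns []
import Mathlib
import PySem

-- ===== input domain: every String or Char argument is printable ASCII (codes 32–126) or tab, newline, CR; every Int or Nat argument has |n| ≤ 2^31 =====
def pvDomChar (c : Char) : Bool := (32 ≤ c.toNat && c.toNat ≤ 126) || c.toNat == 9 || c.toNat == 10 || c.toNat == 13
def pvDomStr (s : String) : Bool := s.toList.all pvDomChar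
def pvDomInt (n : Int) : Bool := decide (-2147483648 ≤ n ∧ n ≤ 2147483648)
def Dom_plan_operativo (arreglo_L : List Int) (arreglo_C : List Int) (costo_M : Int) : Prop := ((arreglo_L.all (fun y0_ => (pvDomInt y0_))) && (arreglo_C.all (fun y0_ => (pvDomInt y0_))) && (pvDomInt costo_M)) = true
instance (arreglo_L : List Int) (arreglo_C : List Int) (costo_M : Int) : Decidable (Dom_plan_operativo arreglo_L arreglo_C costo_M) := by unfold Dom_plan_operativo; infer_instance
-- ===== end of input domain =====

-- B replaces A's forward DP + backward backtrack + reverse by a single forward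
-- pass that carries the best plan for each end-state (objective: alternative).

-- ===== PORT A =====
-- loop body of A's forward pass: state = (opt_L, opt_C, resultado)
def pvStepA (arreglo_L arreglo_C : List Int) (costo_M : Int)
    (s : List Int × List Int × List Int) (i : Int) : List Int × List Int × List Int :=
  let optL := s.1
  let optC := s.2.1
  let optL' := optL ++ [PySem.List.pyGetD arreglo_L i 0 + min (PySem.List.pyGetD optL i 0) (PySem.List.pyGetD optC i 0 + costo_M)]
  let optC' := optC ++ [PySem.List.pyGetD arreglo_C i 0 + min (PySem.List.pyGetD optC i 0) (PySem.List.pyGetD optL i 0 + costo_M)]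
  (optL', optC', s.2.2 ++ [min (PySem.List.pyGetD optL' (i + 1) 0) (PySem.List.pyGetD optC' (i + 1) 0)])

-- loop body of reconstruccion: state = (solucion, k, termine_L)
def pvStepR (optL optC : List Int) (costo_M : Int)
    (s : List String × Int × Bool) (_i : Int) : List String × Int × Bool :=
  let k := s.2.1
  if s.2.2 = true then
    if PySem.List.pyGetD optL k 0 < PySem.List.pyGetD optC k 0 + costo_M then
      (s.1 ++ ["londres"], k - 1, true)
    else
      (s.1 ++ ["california"], k - 1, false)
  else
    if PySem.List.pyGetD optC k 0 < PySem.List.pyGetD optL k 0 + costo_M then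
      (s.1 ++ ["california"], k - 1, false)
    else
      (s.1 ++ ["londres"], k - 1, true)

def reconstruccion (_arreglo_L _arreglo_C : List Int) (costo_M : Int)
    (optL optC res : List Int) : List String :=
  let k : Int := (res.length : Int) - 1
  let init : List String × Int × Bool :=
    if PySem.List.pyGetD optL k 0 < PySem.List.pyGetD optC k 0 then
      (["londres"], k - 1, true)
    else
      (["california"], k - 1, false)
  ((PySem.List.pyRange 0 ((res.length : Int) - 2) 1).foldl (pvStepR optL optC costo_M) init).1.reverse

def plan_operativo (arreglo_L : List Int) (arreglo_C : List Int) (costo_M : Int) : List String :=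
  if arreglo_L.length = 0 then []
  else if arreglo_L.length = 1 then
    if PySem.List.pyGetD arreglo_C 0 0 < PySem.List.pyGetD arreglo_L 0 0 then ["california"]
    else ["londres"]
  else
    let st := (PySem.List.pyRange 0 (arreglo_C.length : Int) 1).foldl
      (pvStepA arreglo_L arreglo_C costo_M) ([0], [0], [0])
    reconstruccion arreglo_L arreglo_C costo_M st.1 st.2.1 st.2.2

-- ===== PORT B =====
-- loop body of B's single pass: state = (cost_L, plan_L, cost_C, plan_C);
-- the Python linked cells (label, tail) are exactly cons cells, so each carried
-- plan is a List String with the newest day's label first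
def pvStepB (arreglo_L arreglo_C : List Int) (costo_M : Int)
    (s : Int × List String × Int × List String) (i : Int) : Int × List String × Int × List String :=
  let costL := s.1
  let planL := s.2.1
  let costC := s.2.2.1
  let planC := s.2.2.2
  (PySem.List.pyGetD arreglo_L i 0 + min costL (costC + costo_M),
   "londres" :: (if costL < costC + costo_M then planL else planC),
   PySem.List.pyGetD arreglo_C i 0 + min costC (costL + costo_M),
   "california" :: (if costC < costL + costo_M then planC else planL))

def plan_operativo_alt (arreglo_L : List Int) (arreglo_C : List Int) (costo_M : Int) : List String :=
  if arreglo_L.length = 0 then []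
  else if arreglo_L.length = 1 then
    if PySem.List.pyGetD arreglo_C 0 0 < PySem.List.pyGetD arreglo_L 0 0 then ["california"]
    else ["londres"]
  else
    let st := (PySem.List.pyRange 0 (arreglo_C.length : Int) 1).foldl
      (pvStepB arreglo_L arreglo_C costo_M) (0, [], 0, [])
    -- the Python while-loop unwinds the linked cells newest-first and reverses:
    -- on the cons-cell representation that is exactly List.reverse
    (if st.1 < st.2.2.1 then st.2.1 else st.2.2.2).reverse

-- ===== PRECONDITION & SPEC =====
-- Pre_ excludes exactly the inputs on which Python A raises IndexError (and B raises
-- identically): a single-day L with an empty C, and C longer than L when len(L) ≥ 2.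
def Pre_plan_operativo (arreglo_L : List Int) (arreglo_C : List Int) (costo_M : Int) : Prop :=
  (arreglo_L.length = 1 → arreglo_C ≠ []) ∧ (2 ≤ arreglo_L.length → arreglo_C.length ≤ arreglo_L.length)

instance (arreglo_L : List Int) (arreglo_C : List Int) (costo_M : Int) : Decidable (Pre_plan_operativo arreglo_L arreglo_C costo_M) := by unfold Pre_plan_operativo; infer_instance

def pvWitness_plan_operativo : List Int × List Int × Int := ([1, 2, 3], [2, 1, 4], 1)

-- On inputs with len(arreglo_L) ≥ 2 and arreglo_C empty (zero operation days), A returns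
-- the phantom plan ["california"] left over from its seeded day 0, while B returns [],
-- the intended answer when there are no days to plan.
def D_plan_operativo (arreglo_L : List Int) (arreglo_C : List Int) (costo_M : Int) : Prop :=
  2 ≤ arreglo_L.length ∧ arreglo_C = []

instance (arreglo_L : List Int) (arreglo_C : List Int) (costo_M : Int) : Decidable (D_plan_operativo arreglo_L arreglo_C costo_M) := by unfold D_plan_operativo; infer_instance

def Spec_plan_operativo (arreglo_L : List Int) (arreglo_C : List Int) (costo_M : Int) (out : List String) : Prop := ¬ D_plan_operativo arreglo_L arreglo_C costo_M → out = plan_operativo_alt arreglo_L arreglo_C costo_M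
instance (arreglo_L : List Int) (arreglo_C : List Int) (costo_M : Int) (out : List String) : Decidable (Spec_plan_operativo arreglo_L arreglo_C costo_M out) := by unfold Spec_plan_operativo; infer_instance

def pvDiffWitness_plan_operativo : List Int × List Int × Int := ([1, 2], [], 0)
def pvDiffWitnessOut_plan_operativo : (List String) × (List String) := (["california"], [])

-- ===== CLAIM (what is proved, stated in full; the proofs are below) =====
def Claim_unchanged_plan_operativo : Prop := ∀ (arreglo_L : List Int) (arreglo_C : List Int) (costo_M : Int), Dom_plan_operativo arreglo_L arreglo_C costo_M → Pre_plan_operativo arreglo_L arreglo_C costo_M → Spec_plan_operativo arreglo_L arreglo_C costo_M (plan_operativo arreglo_L arreglo_C costo_M)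
def Claim_changed_plan_operativo : Prop := Dom_plan_operativo (pvDiffWitness_plan_operativo.1) (pvDiffWitness_plan_operativo.2.1) (pvDiffWitness_plan_operativo.2.2) ∧ Pre_plan_operativo (pvDiffWitness_plan_operativo.1) (pvDiffWitness_plan_operativo.2.1) (pvDiffWitness_plan_operativo.2.2) ∧ D_plan_operativo (pvDiffWitness_plan_operativo.1) (pvDiffWitness_plan_operativo.2.1) (pvDiffWitness_plan_operativo.2.2) ∧ plan_operativo (pvDiffWitness_plan_operativo.1) (pvDiffWitness_plan_operativo.2.1) (pvDiffWitness_plan_operativo.2.2) = pvDiffWitnessOut_plan_operativo.1 ∧ plan_operativo_alt (pvDiffWitness_plan_operativo.1) (pvDiffWitness_plan_operativo.2.1) (pvDiffWitness_plan_operativo.2.2) = pvDiffWitnessOut_plan_operativo.2 ∧ pvDiffWitnessOut_plan_operativo.1 ≠ pvDiffWitnessOut_plan_operativo.2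
def Claim_exact_plan_operativo : Prop := ∀ (arreglo_L : List Int) (arreglo_C : List Int) (costo_M : Int), Dom_plan_operativo arreglo_L arreglo_C costo_M → Pre_plan_operativo arreglo_L arreglo_C costo_M → D_plan_operativo arreglo_L arreglo_C costo_M → plan_operativo arreglo_L arreglo_C costo_M ≠ plan_operativo_alt arreglo_L arreglo_C costo_M

-- ===== LEMMAS AND PROOFS =====

-- the shared DP values: pvOpt k = (opt_L[k], opt_C[k])
def pvOpt (L C : List Int) (c : Int) : Nat → Int × Int
  | 0 => (0, 0)
  | k + 1 =>
    let p := pvOpt L C c k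
    (PySem.List.pyGetD L (k : Int) 0 + min p.1 (p.2 + c),
     PySem.List.pyGetD C (k : Int) 0 + min p.2 (p.1 + c))

-- shared back-pointer: the state at day k given state b at day k+1
def pvBP (L C : List Int) (c : Int) (b : Bool) (k : Nat) : Bool :=
  if b then decide ((pvOpt L C c k).1 < (pvOpt L C c k).2 + c)
  else !decide ((pvOpt L C c k).2 < (pvOpt L C c k).1 + c)

-- labels appended during A's backtracking, from day k down to day 1, given state b at day k+1
def pvWalk (L C : List Int) (c : Int) : Nat → Bool → List String
  | 0, _ => []
  | k + 1, b =>
    let b' := pvBP L C c b (k + 1)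
    (if b' then "londres" else "california") :: pvWalk L C c k b'

-- the forward-carried plan of B (newest label first): days k-1..0 given state b at day k
def pvPlanR (L C : List Int) (c : Int) : Nat → Bool → List String
  | 0, _ => []
  | k + 1, b => (if b then "londres" else "california") :: pvPlanR L C c k (pvBP L C c b k)

lemma pyGetD_concat_length (xs : List Int) (v : Int) :
    PySem.List.pyGetD (xs ++ [v]) (xs.length : Int) 0 = v := by
  simp [PySem.List.pyGetD_natCast, List.getD_eq_getElem?_getD]

lemma foldA_spec (L C : List Int) (c : Int) (m : Nat) :
    (PySem.List.pyRange 0 (m : Int) 1).foldl (pvStepA L C c) ([0], [0], [0]) =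
      ((List.range (m + 1)).map (fun j => (pvOpt L C c j).1),
       (List.range (m + 1)).map (fun j => (pvOpt L C c j).2),
       (0 : Int) :: (List.range m).map (fun j => min (pvOpt L C c (j + 1)).1 (pvOpt L C c (j + 1)).2)) := by
  induction m with
  | zero => simp [PySem.List.pyRange_one_eq_nil, pvOpt]
  | succ m ih =>
    rw [show ((m + 1 : Nat) : Int) = (m : Int) + 1 by push_cast; ring,
        PySem.List.pyRange_one_succ_right (by positivity), List.foldl_append, ih]
    have hL : PySem.List.pyGetD ((List.range (m + 1)).map (fun j => (pvOpt L C c j).1)) (m : Int) 0 = (pvOpt L C c m).1 := by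
      rw [PySem.List.pyGetD_natCast, PySem.List.getD_map_range _ _ _ _ (Nat.lt_succ_self m)]
    have hC : PySem.List.pyGetD ((List.range (m + 1)).map (fun j => (pvOpt L C c j).2)) (m : Int) 0 = (pvOpt L C c m).2 := by
      rw [PySem.List.pyGetD_natCast, PySem.List.getD_map_range _ _ _ _ (Nat.lt_succ_self m)]
    simp only [List.foldl_cons, List.foldl_nil, pvStepA, hL, hC]
    refine Prod.ext ?_ (Prod.ext ?_ ?_)
    · simp [List.range_succ, pvOpt]
    · simp [List.range_succ, pvOpt]
    · have e1 : ((m : Int) + 1) = ((((List.range (m + 1)).map (fun j => (pvOpt L C c j).1)).length : Nat) : Int) := by simp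
      simp only [e1, pyGetD_concat_length]
      have e2 : ((((List.range (m + 1)).map (fun j => (pvOpt L C c j).1)).length : Nat) : Int) = ((((List.range (m + 1)).map (fun j => (pvOpt L C c j).2)).length : Nat) : Int) := by simp
      rw [e2, pyGetD_concat_length]
      simp [List.range_succ, pvOpt]

lemma foldR_spec (L C : List Int) (c : Int) (m : Nat) :
    ∀ (l : List Int), l.length < m → ∀ (sol : List String) (b : Bool),
      (l.foldl (pvStepR ((List.range (m + 1)).map (fun j => (pvOpt L C c j).1))
                        ((List.range (m + 1)).map (fun j => (pvOpt L C c j).2)) c)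
        (sol, (l.length : Int), b)).1 = sol ++ pvWalk L C c l.length b := by
  intro l
  induction l with
  | nil => intro _ sol b; simp [pvWalk]
  | cons x l ih =>
    intro h sol b
    have h' : l.length + 1 < m := by simpa using h
    have hk : (l.length + 1 : Nat) < m + 1 := by omega
    have hL : PySem.List.pyGetD ((List.range (m + 1)).map (fun j => (pvOpt L C c j).1)) ((l.length : Int) + 1) 0 = (pvOpt L C c (l.length + 1)).1 := by
      rw [show ((l.length : Int) + 1) = ((l.length + 1 : Nat) : Int) by omega,
          PySem.List.pyGetD_natCast, PySem.List.getD_map_range _ _ _ _ hk]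
    have hC : PySem.List.pyGetD ((List.range (m + 1)).map (fun j => (pvOpt L C c j).2)) ((l.length : Int) + 1) 0 = (pvOpt L C c (l.length + 1)).2 := by
      rw [show ((l.length : Int) + 1) = ((l.length + 1 : Nat) : Int) by omega,
          PySem.List.pyGetD_natCast, PySem.List.getD_map_range _ _ _ _ hk]
    have hlen : ((x :: l).length : Int) = (l.length : Int) + 1 := by simp
    rw [List.foldl_cons]
    have hstep : pvStepR ((List.range (m + 1)).map (fun j => (pvOpt L C c j).1))
        ((List.range (m + 1)).map (fun j => (pvOpt L C c j).2)) c (sol, ((x :: l).length : Int), b) x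
        = (sol ++ [if pvBP L C c b (l.length + 1) then "londres" else "california"], (l.length : Int), pvBP L C c b (l.length + 1)) := by
      simp only [pvStepR, hlen, hL, hC, pvBP]
      cases b <;> by_cases hcmp : (pvOpt L C c (l.length + 1)).1 < (pvOpt L C c (l.length + 1)).2 + c <;>
        by_cases hcmp2 : (pvOpt L C c (l.length + 1)).2 < (pvOpt L C c (l.length + 1)).1 + c <;>
        simp [hcmp, hcmp2]
    rw [hstep, ih (by omega)]
    simp [pvWalk]

-- B's carried plan is exactly A's backtrack output before its final reverse
lemma planR_eq_walk (L C : List Int) (c : Int) (k : Nat) (b : Bool) :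
    pvPlanR L C c (k + 1) b
      = (if b then "londres" else "california") :: pvWalk L C c k b := by
  induction k generalizing b with
  | zero => simp [pvPlanR, pvWalk]
  | succ k ih =>
    have hstep : pvPlanR L C c (k + 1 + 1) b
        = (if b then "londres" else "california") :: pvPlanR L C c (k + 1) (pvBP L C c b (k + 1)) := rfl
    rw [hstep, ih]
    simp [pvWalk]

lemma foldB_spec (L C : List Int) (c : Int) (m : Nat) :
    (PySem.List.pyRange 0 (m : Int) 1).foldl (pvStepB L C c) (0, [], 0, []) =
      ((pvOpt L C c m).1, pvPlanR L C c m true, (pvOpt L C c m).2, pvPlanR L C c m false) := by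
  induction m with
  | zero => simp [PySem.List.pyRange_one_eq_nil, pvOpt, pvPlanR]
  | succ m ih =>
    rw [show ((m + 1 : Nat) : Int) = (m : Int) + 1 by push_cast; ring,
        PySem.List.pyRange_one_succ_right (by positivity), List.foldl_append, ih]
    simp only [List.foldl_cons, List.foldl_nil, pvStepB]
    refine Prod.ext ?_ (Prod.ext ?_ (Prod.ext ?_ ?_)) <;>
      simp only [pvOpt, pvPlanR, pvBP] <;>
      by_cases h1 : (pvOpt L C c m).1 < (pvOpt L C c m).2 + c <;>
      by_cases h2 : (pvOpt L C c m).2 < (pvOpt L C c m).1 + c <;>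
      simp [h1, h2]

-- A's generic branch as the reversed label-walk, for at least one day
lemma reconA_eq (L C : List Int) (c : Int) (n : Nat) :
    reconstruccion L C c
        ((List.range (n + 1 + 1)).map (fun j => (pvOpt L C c j).1))
        ((List.range (n + 1 + 1)).map (fun j => (pvOpt L C c j).2))
        ((0 : Int) :: (List.range (n + 1)).map (fun j => min (pvOpt L C c (j + 1)).1 (pvOpt L C c (j + 1)).2)) =
      ((if decide ((pvOpt L C c (n + 1)).1 < (pvOpt L C c (n + 1)).2) = true then "londres" else "california")
        :: pvWalk L C c n (decide ((pvOpt L C c (n + 1)).1 < (pvOpt L C c (n + 1)).2))).reverse := by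
  have hgL : PySem.List.pyGetD ((List.range (n + 1 + 1)).map (fun j => (pvOpt L C c j).1)) ((n + 1 : Nat) : Int) 0 = (pvOpt L C c (n + 1)).1 := by
    rw [PySem.List.pyGetD_natCast, PySem.List.getD_map_range _ _ _ _ (Nat.lt_succ_self (n + 1))]
  have hgC : PySem.List.pyGetD ((List.range (n + 1 + 1)).map (fun j => (pvOpt L C c j).2)) ((n + 1 : Nat) : Int) 0 = (pvOpt L C c (n + 1)).2 := by
    rw [PySem.List.pyGetD_natCast, PySem.List.getD_map_range _ _ _ _ (Nat.lt_succ_self (n + 1))]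
  unfold reconstruccion
  simp only [List.length_cons, List.length_map, List.length_range]
  rw [show ((n + 1 + 1 : Nat) : Int) - 1 = ((n + 1 : Nat) : Int) by push_cast; ring,
      show ((n + 1 + 1 : Nat) : Int) - 2 = ((n : Nat) : Int) by push_cast; ring,
      hgL, hgC]
  have hinit : (if (pvOpt L C c (n + 1)).1 < (pvOpt L C c (n + 1)).2
      then ((["londres"], ((n + 1 : Nat) : Int) - 1, true) : List String × Int × Bool)
      else (["california"], ((n + 1 : Nat) : Int) - 1, false))
      = ([if decide ((pvOpt L C c (n + 1)).1 < (pvOpt L C c (n + 1)).2) = true then "londres" else "california"],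
         ((n : Nat) : Int), decide ((pvOpt L C c (n + 1)).1 < (pvOpt L C c (n + 1)).2)) := by
    by_cases hb : (pvOpt L C c (n + 1)).1 < (pvOpt L C c (n + 1)).2 <;>
      simp [hb]
  rw [hinit]
  have hlen : (PySem.List.pyRange 0 ((n : Nat) : Int) 1).length = n := by
    rw [PySem.List.length_pyRange_one]; omega
  have hA := foldR_spec L C c (n + 1) (PySem.List.pyRange 0 ((n : Nat) : Int) 1) (by omega)
    [if decide ((pvOpt L C c (n + 1)).1 < (pvOpt L C c (n + 1)).2) = true then "londres" else "california"]
    (decide ((pvOpt L C c (n + 1)).1 < (pvOpt L C c (n + 1)).2))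
  rw [hlen] at hA
  rw [hA]
  simp

-- ===== VERDICT (by name: the statement is the Claim_ definition above) =====
theorem plan_operativo_spec : Claim_unchanged_plan_operativo := by
  intro L C c _hdom _hpre
  unfold Spec_plan_operativo
  intro hD
  by_cases h0 : L.length = 0
  · simp [plan_operativo, plan_operativo_alt, h0]
  by_cases h1 : L.length = 1
  · simp [plan_operativo, plan_operativo_alt, h1]
  have hL2 : 2 ≤ L.length := by omega
  have hC : C ≠ [] := by
    intro hc
    exact hD ⟨hL2, hc⟩
  obtain ⟨n, hn⟩ : ∃ n, C.length = n + 1 := by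
    cases hcl : C.length with
    | zero => exact absurd (List.length_eq_zero_iff.mp hcl) hC
    | succ n => exact ⟨n, rfl⟩
  simp only [plan_operativo, plan_operativo_alt, h0, h1, if_false, hn, foldA_spec, foldB_spec]
  rw [reconA_eq]
  by_cases hb : (pvOpt L C c (n + 1)).1 < (pvOpt L C c (n + 1)).2 <;>
    simp [hb, planR_eq_walk]

theorem plan_operativo_changed : Claim_changed_plan_operativo := by
  unfold Claim_changed_plan_operativo; decide

theorem plan_operativo_tight : Claim_exact_plan_operativo := by
  intro L C c _hdom _hpre hD
  obtain ⟨hL2, hC⟩ := hD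
  have h0 : ¬ L.length = 0 := by omega
  have h1 : ¬ L.length = 1 := by omega
  subst hC
  simp [plan_operativo, plan_operativo_alt, h0, h1, reconstruccion,
    PySem.List.pyRange, PySem.List.pyGetD, PySem.List.pyGet?, PySem.List.pyIdx?]
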